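-- pv_equiv track=rewrite | github.com/allchemy-net/MCRcode | score.py | getNetSbsAndProd
-- ===== SOURCE A (Python) =====
-- def getNetSbsAndProd(path):
--     rea = dict()
--     for rx in path:
--         prod, sbses, _ = rx
--         if prod in rea:
--             rea[prod][1] += 1
--         else:
--             rea[prod] = [0, 1]
--         for sbs in sbses:
--             if sbs in rea:
--                 rea[sbs][0] += 1
--             else:
--                 rea[sbs] = [1, 0]
--     sbses, prods, manyuse = dict(), dict(), dict()
--     for smi in rea:
--         nsbs, nprod = rea[smi]
--         if nsbs == nprod:
--             continue
--         if nsbs and nprod: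
--             manyuse[smi] = [nsbs, nprod]
--         if nsbs:
--             sbses[smi] = nsbs
--         if nprod:
--             prods[smi] = nprod
--     return sbses, prods, manyuse
-- ===== SOURCE B (Python) =====
-- def getNetSbsAndProd(path):
--     # flatten the path into one event stream, then count each molecule by rescanning the stream
--     events = []
--     for rx in path:
--         prod, sbses, _ = rx
--         events.append((prod, False))
--         for sbs in sbses:
--             events.append((sbs, True))
--     sbses_out, prods, manyuse = {}, {}, {}
--     seen = set()
--     for smi, _ in events:
--         if smi in seen:
--             continue
--         seen.add(smi)
--         nsbs = sum(1 for m, is_sbs in events if is_sbs and m == smi)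
--         nprod = sum(1 for m, is_sbs in events if not is_sbs and m == smi)
--         if nsbs == nprod:
--             continue
--         if nsbs and nprod:
--             manyuse[smi] = [nsbs, nprod]
--         if nsbs:
--             sbses_out[smi] = nsbs
--         if nprod:
--             prods[smi] = nprod
--     return sbses_out, prods, manyuse
-- ===== Notes on version B (the rewrite author's own statement) =====
-- stated objective: alternative
-- what changed: B maintains no usage counters at all: it flattens the path into a single (molecule, is_substrate) event stream and, for each first occurrence in that stream, computes the substrate and product counts by rescanning the whole stream, instead of A's single pass that mutates a dict of [nsbs, nprod] pairs.
import Mathlib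
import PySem

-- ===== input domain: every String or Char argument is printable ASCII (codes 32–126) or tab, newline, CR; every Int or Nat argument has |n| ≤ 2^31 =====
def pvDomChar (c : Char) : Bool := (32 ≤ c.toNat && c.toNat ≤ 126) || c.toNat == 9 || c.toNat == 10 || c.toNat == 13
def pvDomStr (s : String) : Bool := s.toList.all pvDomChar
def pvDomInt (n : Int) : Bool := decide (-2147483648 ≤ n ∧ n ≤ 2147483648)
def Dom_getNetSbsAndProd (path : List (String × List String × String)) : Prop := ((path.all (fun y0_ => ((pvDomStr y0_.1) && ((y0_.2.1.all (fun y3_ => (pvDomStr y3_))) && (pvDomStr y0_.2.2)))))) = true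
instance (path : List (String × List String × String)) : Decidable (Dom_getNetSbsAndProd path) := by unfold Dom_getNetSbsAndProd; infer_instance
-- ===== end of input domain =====

-- B drops A's incremental dict of [nsbs, nprod] counters entirely: it flattens the path into one
-- (molecule, is_substrate) event stream and counts each first-seen molecule by rescanning the stream
-- (objective: alternative algorithm; B is not faster).

-- ===== PORT A =====
-- A's first loop body: 'rea[prod][1] += 1 / rea[prod] = [0,1]' then the inner loop over sbses
def aCount (rea : PySem.Dict String (Int × Int)) (rx : String × List String × String) :
    PySem.Dict String (Int × Int) :=
  let prod := rx.1
  let rea :=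
    if rea.contains prod then
      rea.insert prod ((rea.getD prod (0, 0)).1, (rea.getD prod (0, 0)).2 + 1)
    else rea.insert prod (0, 1)
  rx.2.1.foldl (fun rea sbs =>
    if rea.contains sbs then
      rea.insert sbs ((rea.getD sbs (0, 0)).1 + 1, (rea.getD sbs (0, 0)).2)
    else rea.insert sbs (1, 0)) rea

-- the body of A's second loop 'for smi in rea: …'
def aSel (acc : PySem.Dict String Int × PySem.Dict String Int × PySem.Dict String (List Int))
    (it : String × Int × Int) :
    PySem.Dict String Int × PySem.Dict String Int × PySem.Dict String (List Int) :=
  let smi := it.1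
  let nsbs := it.2.1
  let nprod := it.2.2
  if nsbs = nprod then acc
  else
    let m := if nsbs ≠ 0 ∧ nprod ≠ 0 then acc.2.2.insert smi [nsbs, nprod] else acc.2.2
    let s := if nsbs ≠ 0 then acc.1.insert smi nsbs else acc.1
    let p := if nprod ≠ 0 then acc.2.1.insert smi nprod else acc.2.1
    (s, p, m)

def getNetSbsAndProd (path : List (String × List String × String)) :
    (List (String × Int)) × (List (String × Int)) × (List (String × List Int)) :=
  let rea := path.foldl aCount PySem.Dict.empty
  let fin := rea.items.foldl aSel (PySem.Dict.empty, PySem.Dict.empty, PySem.Dict.empty)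
  (fin.1.items, fin.2.1.items, fin.2.2.items)

-- ===== PORT B =====
-- B's event-building loop: append (prod, False), then (sbs, True) for each sbs
def bEvStep (ev : List (String × Bool)) (rx : String × List String × String) :
    List (String × Bool) :=
  rx.2.1.foldl (fun ev s => ev ++ [(s, true)]) (ev ++ [(rx.1, false)])

def bEvents (path : List (String × List String × String)) : List (String × Bool) :=
  path.foldl bEvStep []

-- 'sum(1 for m, is_sbs in events if is_sbs and m == smi)' and its product counterpart
def bCntS (ev : List (String × Bool)) (smi : String) : Int :=
  ((ev.filter (fun p => p.2 && (p.1 == smi))).length : Int)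
def bCntP (ev : List (String × Bool)) (smi : String) : Int :=
  ((ev.filter (fun p => !p.2 && (p.1 == smi))).length : Int)

-- the per-new-molecule body of B's second loop (after the 'smi in seen' skip)
def bBody (ev : List (String × Bool))
    (acc : PySem.Dict String Int × PySem.Dict String Int × PySem.Dict String (List Int))
    (smi : String) :
    PySem.Dict String Int × PySem.Dict String Int × PySem.Dict String (List Int) :=
  let nsbs := bCntS ev smi
  let nprod := bCntP ev smi
  if nsbs = nprod then acc
  else
    let m := if nsbs ≠ 0 ∧ nprod ≠ 0 then acc.2.2.insert smi [nsbs, nprod] else acc.2.2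
    let s := if nsbs ≠ 0 then acc.1.insert smi nsbs else acc.1
    let p := if nprod ≠ 0 then acc.2.1.insert smi nprod else acc.2.1
    (s, p, m)

-- B's second loop step: state = (seen : set, the three result dicts)
def bStep (ev : List (String × Bool))
    (st : PySem.Set String ×
      (PySem.Dict String Int × PySem.Dict String Int × PySem.Dict String (List Int)))
    (e : String × Bool) :
    PySem.Set String ×
      (PySem.Dict String Int × PySem.Dict String Int × PySem.Dict String (List Int)) :=
  if PySem.Set.contains st.1 e.1 then st
  else (PySem.Set.add st.1 e.1, bBody ev st.2 e.1)

def getNetSbsAndProd_alt (path : List (String × List String × String)) :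
    (List (String × Int)) × (List (String × Int)) × (List (String × List Int)) :=
  let ev := bEvents path
  let fin := ev.foldl (bStep ev)
    (PySem.Set.empty, (PySem.Dict.empty, PySem.Dict.empty, PySem.Dict.empty))
  (fin.2.1.items, fin.2.2.1.items, fin.2.2.2.items)

-- ===== PRECONDITION & SPEC =====
def Spec_getNetSbsAndProd (path : List (String × List String × String)) (out : (List (String × Int)) × (List (String × Int)) × (List (String × List Int))) : Prop := out = getNetSbsAndProd_alt path
instance (path : List (String × List String × String)) (out : (List (String × Int)) × (List (String × Int)) × (List (String × List Int))) : Decidable (Spec_getNetSbsAndProd path out) := by unfold Spec_getNetSbsAndProd; infer_instance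

-- ===== CLAIM (what is proved, stated in full; the proofs are below) =====
def Claim_equal_getNetSbsAndProd : Prop := ∀ (path : List (String × List String × String)), Dom_getNetSbsAndProd path → Spec_getNetSbsAndProd path (getNetSbsAndProd path)

-- ===== LEMMAS AND PROOFS =====

-- first-occurrence order of the molecules in an event stream
def ordOf (ev : List (String × Bool)) : List String :=
  PySem.Set.ofList (ev.map Prod.fst)

-- the coupling invariant: A's dict holds, in first-occurrence order, the counts of the event stream
def Items (rea : PySem.Dict String (Int × Int)) (ev : List (String × Bool)) : Prop :=
  rea.items = (ordOf ev).map (fun k => (k, bCntS ev k, bCntP ev k))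

lemma ordOf_snoc (ev : List (String × Bool)) (x : String) (b : Bool) :
    ordOf (ev ++ [(x, b)]) = PySem.Set.add (ordOf ev) x := by
  simp [ordOf, PySem.Set.ofList_eq_foldl]

lemma cnt_zero_of_not_mem {ev : List (String × Bool)} {k : String} (h : k ∉ ordOf ev) :
    bCntS ev k = 0 ∧ bCntP ev k = 0 := by
  have h' : k ∉ ev.map Prod.fst := by
    intro hm; exact h (by simpa [ordOf, PySem.Set.mem_ofList] using hm)
  have key : ∀ p ∈ ev, (p : String × Bool).1 ≠ k := fun p hp hpk =>
    h' (hpk ▸ List.mem_map_of_mem hp)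
  constructor <;>
  · simp only [bCntS, bCntP, Int.natCast_eq_zero, List.length_eq_zero_iff,
      List.filter_eq_nil_iff]
    intro p hp
    simp [key p hp]

lemma cntS_snoc (ev : List (String × Bool)) (x : String) (b : Bool) (k : String) :
    bCntS (ev ++ [(x, b)]) k =
      bCntS ev k + (if b = true ∧ k = x then 1 else 0) := by
  by_cases hk : x = k
  · subst hk; cases b <;> simp [bCntS, List.filter_append]
  · have hk' : ¬ k = x := fun h => hk h.symm
    cases b <;> simp [bCntS, List.filter_append, hk, hk']

lemma cntP_snoc (ev : List (String × Bool)) (x : String) (b : Bool) (k : String) :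
    bCntP (ev ++ [(x, b)]) k =
      bCntP ev k + (if b = false ∧ k = x then 1 else 0) := by
  by_cases hk : x = k
  · subst hk; cases b <;> simp [bCntP, List.filter_append]
  · have hk' : ¬ k = x := fun h => hk h.symm
    cases b <;> simp [bCntP, List.filter_append, hk, hk']

lemma keys_of_items {rea : PySem.Dict String (Int × Int)} {ev : List (String × Bool)}
    (h : Items rea ev) : rea.keys = ordOf ev := by
  unfold Items at h
  simp only [PySem.Dict.keys, h, List.map_map]
  have hid : ((fun (x : String × ℤ × ℤ) => x.1) ∘ fun k => (k, bCntS ev k, bCntP ev k))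
      = id := rfl
  rw [hid, List.map_id]

lemma contains_of_items {rea : PySem.Dict String (Int × Int)} {ev : List (String × Bool)}
    (h : Items rea ev) (x : String) : rea.contains x = decide (x ∈ ordOf ev) := by
  rw [PySem.Dict.contains_eq_decide_mem_keys, keys_of_items h]

lemma getD_of_items {rea : PySem.Dict String (Int × Int)} {ev : List (String × Bool)}
    (h : Items rea ev) {x : String} (hx : x ∈ ordOf ev) :
    rea.getD x (0, 0) = (bCntS ev x, bCntP ev x) := by
  apply PySem.Dict.getD_of_mem_items
  · rw [show rea.items = _ from h]; exact List.mem_map_of_mem hx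
  · rw [keys_of_items h]; exact PySem.Set.nodup_ofList _

-- one generic single-event step: A's contains/insert update tracks one more event (x, b)
lemma items_step {rea : PySem.Dict String (Int × Int)} {ev : List (String × Bool)}
    (x : String) (b : Bool) (h : Items rea ev)
    (upd : Int × Int → Int × Int) (init : Int × Int)
    (hupd : upd (0, 0) = init)
    (hf : ∀ k, bCntS (ev ++ [(x, b)]) k =
      if k = x then (upd (bCntS ev x, bCntP ev x)).1 else bCntS ev k)
    (hg : ∀ k, bCntP (ev ++ [(x, b)]) k =
      if k = x then (upd (bCntS ev x, bCntP ev x)).2 else bCntP ev k) :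
    Items (if rea.contains x then rea.insert x (upd (rea.getD x (0, 0)))
           else rea.insert x init) (ev ++ [(x, b)]) := by
  have hitems : rea.items = (ordOf ev).map (fun k => (k, bCntS ev k, bCntP ev k)) := h
  have hnd : (ordOf ev).Nodup := PySem.Set.nodup_ofList _
  have hc := contains_of_items h x
  unfold Items
  rw [ordOf_snoc]
  by_cases hx : x ∈ ordOf ev
  · have hct : rea.contains x = true := by simp [hc, hx]
    have hval := getD_of_items h hx
    rw [if_pos hct, PySem.Set.add_of_mem hx,
      PySem.Dict.items_insert_of_contains rea _ hct, hitems, List.map_map]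
    apply List.map_congr_left
    intro k hk
    simp only [Function.comp]
    by_cases hkx : k = x
    · subst hkx
      simp [hval, hf, hg]
    · simp [hkx, hf, hg, beq_iff_eq]
  · have hcf : rea.contains x = false := by simp [hc, hx]
    have hz := cnt_zero_of_not_mem hx
    rw [if_neg (by simp [hcf]), PySem.Set.add_of_not_mem hx,
      PySem.Dict.items_insert_of_not_contains rea _ hcf, hitems, List.map_append]
    congr 1
    · apply List.map_congr_left
      intro k hk
      have hkx : k ≠ x := fun hh => hx (hh ▸ hk)
      simp [hf, hg, hkx]
    · simp [hf, hg, hz.1, hz.2, ← hupd]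

lemma items_prod_step {rea : PySem.Dict String (Int × Int)} {ev : List (String × Bool)}
    (x : String) (h : Items rea ev) :
    Items (if rea.contains x then
        rea.insert x ((rea.getD x (0, 0)).1, (rea.getD x (0, 0)).2 + 1)
      else rea.insert x (0, 1)) (ev ++ [(x, false)]) := by
  exact items_step x false h (fun p => (p.1, p.2 + 1)) (0, 1) rfl
    (fun k => by rw [cntS_snoc]; by_cases hk : k = x <;> simp [hk])
    (fun k => by rw [cntP_snoc]; by_cases hk : k = x <;> simp [hk])

lemma items_sbs_step {rea : PySem.Dict String (Int × Int)} {ev : List (String × Bool)}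
    (x : String) (h : Items rea ev) :
    Items (if rea.contains x then
        rea.insert x ((rea.getD x (0, 0)).1 + 1, (rea.getD x (0, 0)).2)
      else rea.insert x (1, 0)) (ev ++ [(x, true)]) := by
  exact items_step x true h (fun p => (p.1 + 1, p.2)) (1, 0) rfl
    (fun k => by rw [cntS_snoc]; by_cases hk : k = x <;> simp [hk])
    (fun k => by rw [cntP_snoc]; by_cases hk : k = x <;> simp [hk])

lemma items_sbs_fold (l : List String) {rea : PySem.Dict String (Int × Int)}
    {ev : List (String × Bool)} (h : Items rea ev) :
    Items (l.foldl (fun rea sbs =>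
        if rea.contains sbs then
          rea.insert sbs ((rea.getD sbs (0, 0)).1 + 1, (rea.getD sbs (0, 0)).2)
        else rea.insert sbs (1, 0)) rea)
      (l.foldl (fun ev s => ev ++ [(s, true)]) ev) := by
  induction l generalizing rea ev with
  | nil => exact h
  | cons x rest ih => exact ih (items_sbs_step x h)

lemma items_count {rea : PySem.Dict String (Int × Int)} {ev : List (String × Bool)}
    (rx : String × List String × String) (h : Items rea ev) :
    Items (aCount rea rx) (bEvStep ev rx) := by
  exact items_sbs_fold rx.2.1 (items_prod_step rx.1 h)

lemma items_fold (path : List (String × List String × String))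
    {rea : PySem.Dict String (Int × Int)} {ev : List (String × Bool)} (h : Items rea ev) :
    Items (path.foldl aCount rea) (path.foldl bEvStep ev) := by
  induction path generalizing rea ev with
  | nil => exact h
  | cons rx rest ih => exact ih (items_count rx h)

-- the keys B's second loop actually processes, given the already-seen set
def newKeys : List (String × Bool) → PySem.Set String → List String
  | [], _ => []
  | e :: rest, s =>
    if PySem.Set.contains s e.1 then newKeys rest s
    else e.1 :: newKeys rest (PySem.Set.add s e.1)

lemma bfold (E l : List (String × Bool)) (s : PySem.Set String)
    (acc : PySem.Dict String Int × PySem.Dict String Int × PySem.Dict String (List Int)) :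
    (l.foldl (bStep E) (s, acc)).2 = (newKeys l s).foldl (bBody E) acc := by
  induction l generalizing s acc with
  | nil => rfl
  | cons e rest ih =>
    simp only [List.foldl_cons, newKeys, bStep]
    by_cases hc : PySem.Set.contains s e.1 = true
    · simp only [hc, if_pos]; exact ih s acc
    · simp only [hc, if_neg, Bool.false_eq_true, not_false_iff]
      rw [ih]
      rfl

lemma addFold_eq (l : List (String × Bool)) (s : PySem.Set String) :
    l.foldl (fun t e => PySem.Set.add t e.1) s = s ++ newKeys l s := by
  induction l generalizing s with
  | nil => simp [newKeys]
  | cons e rest ih =>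
    simp only [List.foldl_cons, newKeys]
    by_cases hc : PySem.Set.contains s e.1 = true
    · have hm : e.1 ∈ s := (PySem.Set.contains_iff s e.1).mp hc
      rw [PySem.Set.add_of_mem hm, if_pos hc, ih]
    · have hm : e.1 ∉ s := fun h => hc ((PySem.Set.contains_iff s e.1).mpr h)
      rw [PySem.Set.add_of_not_mem hm, if_neg hc, ih]
      simp

lemma ordOf_eq_newKeys (ev : List (String × Bool)) : ordOf ev = newKeys ev [] := by
  have : ordOf ev = ev.foldl (fun t e => PySem.Set.add t e.1) [] := by
    simp [ordOf, PySem.Set.ofList_eq_foldl, List.foldl_map]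
  rw [this, addFold_eq]; rfl

lemma aSel_eq_bBody (E : List (String × Bool))
    (acc : PySem.Dict String Int × PySem.Dict String Int × PySem.Dict String (List Int))
    (k : String) : aSel acc (k, bCntS E k, bCntP E k) = bBody E acc k := rfl

-- ===== VERDICT (by name: the statement is the Claim_ definition above) =====
theorem getNetSbsAndProd_spec : Claim_equal_getNetSbsAndProd := by
  intro path _
  unfold Spec_getNetSbsAndProd
  simp only [getNetSbsAndProd, getNetSbsAndProd_alt, bEvents]
  have h0 : Items PySem.Dict.empty [] := rfl
  have h := items_fold path h0
  unfold Items at h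
  have hk : newKeys (List.foldl bEvStep [] path) PySem.Set.empty
      = ordOf (List.foldl bEvStep [] path) := (ordOf_eq_newKeys _).symm
  rw [h, List.foldl_map, bfold, hk]
  simp only [aSel_eq_bBody]
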